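-- pv_equiv track=rewrite | github.com/portfolioplus/pytickersymbols | tools/wiki_table_parser.py | _merge_data_sources
-- ===== SOURCE A (Python) =====
-- from typing import Dict, List, Optional, Any
--
-- def _merge_data_sources(primary: List[Dict[str, str]], secondary: List[Dict[str, str]]) -> List[Dict[str, str]]:
--     """Merge data from two sources, preferring primary but filling gaps with secondary"""
--     if not secondary:
--         return primary
--     if not primary:
--         return secondary
--
--     # Create a mapping by name for easier lookup
--     secondary_by_name = {entry.get('name', ''): entry for entry in secondary}
--
--     merged = []
--     for entry in primary:
--         name = entry.get('name', '')
--         # Start with primary data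
--         merged_entry = entry.copy()
--
--         # Fill in missing fields from secondary if available
--         if name in secondary_by_name:
--             for key, value in secondary_by_name[name].items():
--                 if key not in merged_entry or not merged_entry[key]:
--                     merged_entry[key] = value
--
--         merged.append(merged_entry)
--
--     return merged
-- ===== SOURCE B (Python) =====
-- from typing import Dict, List
--
-- def _merge_data_sources(primary: List[Dict[str, str]], secondary: List[Dict[str, str]]) -> List[Dict[str, str]]:
--     """Two staged passes, secondary-major: first sweep SECONDARY once, stamping each
--     primary row's match slot (later matches overwrite earlier ones); then build each
--     merged row non-mutatingly as an overlay: the primary row with falsy values patched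
--     from its match, followed by the match's extra columns."""
--     if not secondary:
--         return primary
--     if not primary:
--         return secondary
--
--     # Pass 1: match slot per primary row, stamped while sweeping secondary.
--     matches = [None] * len(primary)
--     for sec in secondary:
--         sname = sec.get('name', '')
--         for i, entry in enumerate(primary):
--             if entry.get('name', '') == sname:
--                 matches[i] = sec
--
--     # Pass 2: functional overlay per row.
--     result = []
--     for entry, match in zip(primary, matches):
--         if match is None:
--             result.append(entry.copy())
--         else:
--             merged = {k: (v if v else match.get(k, v)) for k, v in entry.items()}
--             for k, v in match.items():
--                 if k not in merged:
--                     merged[k] = v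
--             result.append(merged)
--     return result
-- ===== Notes on version B (the rewrite author's own statement) =====
-- stated objective: alternative
-- what changed: Inverts the control flow: instead of indexing secondary by name and mutating a copied dict per primary row, B makes one secondary-major pass stamping a match slot per primary row (later matches overwrite, giving last-match semantics for free), then builds each merged row non-mutatingly as an overlay comprehension (primary values with falsy ones patched from the match) plus the match's extra keys appended.
import Mathlib
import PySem

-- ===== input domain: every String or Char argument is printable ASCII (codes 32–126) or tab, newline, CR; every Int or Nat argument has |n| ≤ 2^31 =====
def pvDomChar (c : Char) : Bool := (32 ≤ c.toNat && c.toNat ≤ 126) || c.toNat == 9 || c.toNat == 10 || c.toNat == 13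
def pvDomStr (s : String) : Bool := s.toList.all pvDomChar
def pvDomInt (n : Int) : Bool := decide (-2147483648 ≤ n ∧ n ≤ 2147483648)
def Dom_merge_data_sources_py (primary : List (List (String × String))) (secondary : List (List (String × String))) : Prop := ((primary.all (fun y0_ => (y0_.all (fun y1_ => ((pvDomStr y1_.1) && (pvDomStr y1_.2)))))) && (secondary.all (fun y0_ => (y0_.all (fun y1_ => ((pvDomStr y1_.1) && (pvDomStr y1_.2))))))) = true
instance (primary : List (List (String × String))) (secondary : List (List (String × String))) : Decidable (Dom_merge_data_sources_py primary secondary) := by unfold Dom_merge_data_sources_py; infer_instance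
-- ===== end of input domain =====

-- B inverts A's control flow: one secondary-major stamping pass over primary match slots
-- (instead of A's name-indexed dict), then a non-mutating overlay per row; same results.


-- ===== PORT A =====
-- `for key, value in sec.items(): if key not in merged_entry or not merged_entry[key]: merged_entry[key] = value`
def fillFromA (me : PySem.Dict String String) (sec : List (String × String)) : PySem.Dict String String :=
  sec.foldl (fun m kv =>
    if !(m.contains kv.1) || m.getD kv.1 "" == "" then m.insert kv.1 kv.2 else m) me

def merge_data_sources_py (primary : List (List (String × String))) (secondary : List (List (String × String))) : List (List (String × String)) :=
  if secondary = [] then primary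
  else if primary = [] then secondary
  else
    -- secondary_by_name = {entry.get('name', ''): entry for entry in secondary}
    let secondary_by_name : PySem.Dict String (List (String × String)) :=
      secondary.foldl (fun d e => d.insert ((PySem.Dict.mk e).getD "name" "") e) PySem.Dict.empty
    primary.foldl (fun merged entry =>
      let name := (PySem.Dict.mk entry).getD "name" ""
      let merged_entry := PySem.Dict.mk entry       -- entry.copy()
      let merged_entry :=
        match secondary_by_name.get? name with      -- if name in secondary_by_name: …[name]
        | some sec => fillFromA merged_entry sec
        | none => merged_entry
      merged ++ [merged_entry.items]) []

-- ===== PORT B =====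
def merge_data_sources_py_alt (primary : List (List (String × String))) (secondary : List (List (String × String))) : List (List (String × String)) :=
  if secondary = [] then primary
  else if primary = [] then secondary
  else
    -- Pass 1: matches = [None]*len(primary); for sec in secondary: for i, entry in
    -- enumerate(primary): if entry.get('name','') == sec.get('name',''): matches[i] = sec
    -- (the indexed assignment matches[i] = sec is ported as an index-aligned zip-map over primary)
    let ms : List (Option (List (String × String))) :=
      secondary.foldl (fun ms sec =>
        let sname := (PySem.Dict.mk sec).getD "name" ""
        (primary.zip ms).map (fun em =>
          if (PySem.Dict.mk em.1).getD "name" "" == sname then some sec else em.2))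
        (List.replicate primary.length none)
    -- Pass 2: overlay per row
    (primary.zip ms).foldl (fun res em =>
      match em.2 with
      | none => res ++ [(PySem.Dict.mk em.1).items]       -- entry.copy()
      | some sec =>
        let m := PySem.Dict.mk sec
        -- {k: (v if v else match.get(k, v)) for k, v in entry.items()}
        let part1 := (PySem.Dict.mk em.1).items.map
          (fun kv => (kv.1, if kv.2 ≠ "" then kv.2 else m.getD kv.1 kv.2))
        -- for k, v in match.items(): if k not in merged: merged[k] = v
        let merged := m.items.foldl (fun (md : PySem.Dict String String) kv =>
          if md.contains kv.1 then md else md.insert kv.1 kv.2) (PySem.Dict.mk part1)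
        res ++ [merged.items]) []

-- ===== PRECONDITION & SPEC =====
-- Pre_ requires distinct keys inside every row: the rows portray Python dicts, which can
-- never carry a duplicate key, so no input reachable from Python A is excluded.
def Pre_merge_data_sources_py (primary : List (List (String × String))) (secondary : List (List (String × String))) : Prop :=
  (∀ r ∈ primary, (r.map Prod.fst).Nodup) ∧ (∀ r ∈ secondary, (r.map Prod.fst).Nodup)
instance (primary : List (List (String × String))) (secondary : List (List (String × String))) : Decidable (Pre_merge_data_sources_py primary secondary) := by unfold Pre_merge_data_sources_py; infer_instance

def pvWitness_merge_data_sources_py : (List (List (String × String))) × (List (List (String × String))) :=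
  ([[("name", "a"), ("k", "")]], [[("name", "a"), ("k", "v"), ("x", "y")]])

def Spec_merge_data_sources_py (primary : List (List (String × String))) (secondary : List (List (String × String))) (out : List (List (String × String))) : Prop := out = merge_data_sources_py_alt primary secondary
instance (primary : List (List (String × String))) (secondary : List (List (String × String))) (out : List (List (String × String))) : Decidable (Spec_merge_data_sources_py primary secondary out) := by unfold Spec_merge_data_sources_py; infer_instance

-- ===== CLAIM (what is proved, stated in full; the proofs are below) =====
def Claim_equal_merge_data_sources_py : Prop := ∀ (primary : List (List (String × String))) (secondary : List (List (String × String))), Dom_merge_data_sources_py primary secondary → Pre_merge_data_sources_py primary secondary → Spec_merge_data_sources_py primary secondary (merge_data_sources_py primary secondary)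

-- ===== LEMMAS AND PROOFS =====

-- proof-side abbreviations: the per-row name, B's per-value patch, B's last-match scan
def rowName (r : List (String × String)) : String := (PySem.Dict.mk r).getD "name" ""
def patch (sec : List (String × String)) (kv : String × String) : String × String :=
  (kv.1, if kv.2 ≠ "" then kv.2 else (PySem.Dict.mk sec).getD kv.1 kv.2)
def scan (l : List (List (String × String))) (name : String) (acc : Option (List (String × String))) : Option (List (String × String)) :=
  l.foldl (fun acc sec => if rowName sec == name then some sec else acc) acc

theorem zip_self_map {α β : Type} (l : List α) (f : α → β) :
    l.zip (l.map f) = l.map (fun a => (a, f a)) := by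
  induction l with
  | nil => rfl
  | cons a l ih => simp [ih]

theorem contains_mk (l : List (String × String)) (k : String) :
    (PySem.Dict.mk l).contains k = decide (k ∈ l.map Prod.fst) := by
  rw [PySem.Dict.contains_eq_decide_mem_keys]; rfl

theorem get?_mk_append_ne (l : List (String × String)) (p : String × String) (k : String)
    (h : k ≠ p.1) : (PySem.Dict.mk (l ++ [p])).get? k = (PySem.Dict.mk l).get? k := by
  obtain ⟨pk, pv⟩ := p
  simp only at h
  induction l with
  | nil =>
      rw [List.nil_append, PySem.Dict.get?_mk_cons, if_neg (by simpa using Ne.symm h)]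
  | cons a l ih =>
      obtain ⟨ak, av⟩ := a
      rw [List.cons_append, PySem.Dict.get?_mk_cons, PySem.Dict.get?_mk_cons, ih]

theorem get?_mk_append_self (l : List (String × String)) (p : String × String)
    (h : p.1 ∉ l.map Prod.fst) : (PySem.Dict.mk (l ++ [p])).get? p.1 = some p.2 := by
  obtain ⟨pk, pv⟩ := p
  simp only at h ⊢
  induction l with
  | nil => rw [List.nil_append, PySem.Dict.get?_mk_cons, if_pos (by simp)]
  | cons a l ih =>
      obtain ⟨ak, av⟩ := a
      simp only [List.map_cons, List.mem_cons] at h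
      rw [List.cons_append, PySem.Dict.get?_mk_cons,
        if_neg (by simp; exact fun hh => h (Or.inl hh.symm))]
      exact ih (fun hh => h (Or.inr hh))

theorem getD_mk_not_mem (l : List (String × String)) (k : String) (d : String)
    (h : k ∉ l.map Prod.fst) : (PySem.Dict.mk l).getD k d = d :=
  PySem.Dict.getD_of_not_contains _ d (by
    rw [contains_mk]
    simpa using h)

theorem patch_append_ne (l : List (String × String)) (kv p : String × String)
    (h : p.1 ≠ kv.1) : patch (l ++ [kv]) p = patch l p := by
  unfold patch
  rw [PySem.Dict.getD_eq_get?_getD, PySem.Dict.getD_eq_get?_getD, get?_mk_append_ne _ _ _ h]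

theorem mem_value_unique (entry : List (String × String)) (he : (entry.map Prod.fst).Nodup)
    {k : String} {a b : String} (ha : (k, a) ∈ entry) (hb : (k, b) ∈ entry) : a = b := by
  have h1 := PySem.Dict.getD_of_mem_items (PySem.Dict.mk entry) ha (by exact he) ""
  have h2 := PySem.Dict.getD_of_mem_items (PySem.Dict.mk entry) hb (by exact he) ""
  rw [h1] at h2; exact h2

-- lookup in the dict built by overwriting inserts = last matching element of the scan
theorem get?_foldl_insert_eq_scan (secondary : List (List (String × String)))
    (name : String) (d : PySem.Dict String (List (String × String)))
    (acc : Option (List (String × String))) (h : d.get? name = acc) :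
    (secondary.foldl (fun d e => d.insert (rowName e) e) d).get? name
      = scan secondary name acc := by
  induction secondary generalizing d acc with
  | nil => simpa [scan] using h
  | cons e rest ih =>
      simp only [List.foldl_cons, scan] at *
      apply ih
      rw [PySem.Dict.get?_insert]
      by_cases hk : rowName e = name
      · simp [hk]
      · simp [hk, Ne.symm hk, h]

theorem scan_mem (l : List (List (String × String))) (name : String)
    (acc : Option (List (String × String))) (sec : List (String × String))
    (h : scan l name acc = some sec) : sec ∈ l ∨ acc = some sec := by
  induction l generalizing acc with
  | nil => exact Or.inr h
  | cons e rest ih =>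
      simp only [scan, List.foldl_cons] at h
      rcases ih _ h with h' | h'
      · exact Or.inl (List.mem_cons_of_mem _ h')
      · by_cases hk : rowName e = name
        · simp [hk] at h'; exact Or.inl (h' ▸ List.mem_cons_self)
        · simp [hk] at h'; exact Or.inr h'

-- Pass 1 of B computes, at each primary position, the last-match scan of secondary
theorem matches_eq_map (secondary : List (List (String × String)))
    (primary : List (List (String × String)))
    (f : List (String × String) → Option (List (String × String))) :
    secondary.foldl (fun ms sec =>
        (primary.zip ms).map (fun em =>
          if (PySem.Dict.mk em.1).getD "name" "" == (PySem.Dict.mk sec).getD "name" ""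
          then some sec else em.2)) (primary.map f)
      = primary.map (fun e => scan secondary (rowName e) (f e)) := by
  show secondary.foldl (fun ms sec =>
        (primary.zip ms).map (fun em =>
          if rowName em.1 == rowName sec then some sec else em.2)) (primary.map f)
      = primary.map (fun e => scan secondary (rowName e) (f e))
  induction secondary generalizing f with
  | nil => simp [scan]
  | cons sec rest ih =>
      simp only [List.foldl_cons, zip_self_map, List.map_map]
      rw [show ((fun em => if rowName em.1 == rowName sec then some sec else em.2) ∘
              (fun a => (a, f a)))
            = (fun a => if rowName a == rowName sec then some sec else f a) from rfl]
      rw [ih]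
      refine List.map_congr_left (fun e _ => ?_)
      simp only [scan, List.foldl_cons]
      by_cases h : rowName e = rowName sec
      · simp [h]
      · simp [h, Ne.symm h]

-- B's insert-missing fold appends exactly the not-yet-present pairs (distinct keys)
theorem foldl_insert_missing (l : List (String × String)) (md : PySem.Dict String String)
    (hnd : (l.map Prod.fst).Nodup) :
    (l.foldl (fun (md : PySem.Dict String String) kv =>
        if md.contains kv.1 then md else md.insert kv.1 kv.2) md).items
      = md.items ++ l.filter (fun kv => !(md.contains kv.1)) := by
  induction l generalizing md with
  | nil => simp
  | cons kv rest ih =>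
      simp only [List.map_cons, List.nodup_cons] at hnd
      simp only [List.foldl_cons, List.filter_cons]
      by_cases hc : md.contains kv.1
      · simp only [hc, if_true, Bool.not_true]
        rw [ih _ hnd.2]; simp
      · simp only [hc, Bool.not_false]
        rw [if_neg (by simpa using hc), ih _ hnd.2,
            PySem.Dict.items_insert_of_not_contains _ kv.2 (by simpa using hc)]
        have heq : rest.filter (fun kv' => !((md.insert kv.1 kv.2).contains kv'.1))
             = rest.filter (fun kv' => !(md.contains kv'.1)) := by
          refine List.filter_congr (fun kv' hm => ?_)
          have hne : kv'.1 ≠ kv.1 := by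
            intro h; exact hnd.1 (h ▸ List.mem_map_of_mem hm)
          simp [PySem.Dict.contains_insert, hne]
        rw [heq]; simp

-- A's fill loop, characterised: patched primary row ++ the fresh pairs of sec
theorem fillFromA_items (entry : List (String × String))
    (he : (entry.map Prod.fst).Nodup) (sec : List (String × String))
    (hs : (sec.map Prod.fst).Nodup) :
    (fillFromA (PySem.Dict.mk entry) sec).items
      = entry.map (patch sec)
        ++ sec.filter (fun kv => !((PySem.Dict.mk entry).contains kv.1)) := by
  induction sec using List.reverseRecOn with
  | nil =>
      simp only [fillFromA, List.foldl_nil, List.filter_nil, List.append_nil]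
      have : entry.map (patch []) = entry := by
        refine (List.map_congr_left fun p _ => ?_).trans (List.map_id _)
        unfold patch
        rw [getD_mk_not_mem _ _ _ (by simp), ite_self]
        rfl
      rw [this]
  | append_singleton l kv ih =>
      rw [List.map_append, List.map_cons, List.map_nil] at hs
      obtain ⟨hl, -, hdisj⟩ := List.nodup_append.mp hs
      have hk : kv.1 ∉ l.map Prod.fst := fun hmem => hdisj kv.1 hmem kv.1 (by simp) rfl
      have hI := ih hl
      simp only [fillFromA, List.foldl_append, List.foldl_cons, List.foldl_nil] at hI ⊢
      set F := l.foldl (fun m kv =>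
        if !(m.contains kv.1) || m.getD kv.1 "" == "" then m.insert kv.1 kv.2 else m)
        (PySem.Dict.mk entry) with hF
      have hkeysF : F.keys = (entry.map (patch l)).map Prod.fst
          ++ (l.filter (fun kv => !((PySem.Dict.mk entry).contains kv.1))).map Prod.fst := by
        show F.items.map Prod.fst = _
        rw [hI, List.map_append]
      have hmapfst : (entry.map (patch l)).map Prod.fst = entry.map Prod.fst := by
        rw [List.map_map]; rfl
      have hfiltsub : ∀ k, k ∈ (l.filter (fun kv => !((PySem.Dict.mk entry).contains kv.1))).map Prod.fst → k ∈ l.map Prod.fst := by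
        intro k hmem
        rcases List.mem_map.mp hmem with ⟨p, hp, rfl⟩
        exact List.mem_map_of_mem (List.mem_of_mem_filter hp)
      have hcontF : F.contains kv.1 = (PySem.Dict.mk entry).contains kv.1 := by
        rw [PySem.Dict.contains_eq_decide_mem_keys, hkeysF, hmapfst, contains_mk]
        have : kv.1 ∈ entry.map Prod.fst ++ (l.filter (fun kv => !((PySem.Dict.mk entry).contains kv.1))).map Prod.fst ↔ kv.1 ∈ entry.map Prod.fst := by
          simp only [List.mem_append, or_iff_left_iff_imp]
          intro hmem; exact absurd (hfiltsub _ hmem) hk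
        exact decide_eq_decide.mpr this
      by_cases hc : (PySem.Dict.mk entry).contains kv.1
      · -- kv.1 is a key of entry: the pair is patched in place (or left) but never appended
        have hkm : kv.1 ∈ entry.map Prod.fst := by
          have := hc; rw [contains_mk] at this; exact of_decide_eq_true this
        rcases List.mem_map.mp hkm with ⟨p0, hp0, hp0k⟩
        have hv : (kv.1, p0.2) ∈ entry := by rw [← hp0k]; exact hp0
        have hNodupKeysF : F.keys.Nodup := by
          rw [hkeysF, hmapfst, List.nodup_append]
          refine ⟨he, List.Nodup.sublist (List.Sublist.map Prod.fst List.filter_sublist) hl, ?_⟩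
          intro k hk1 k2 hk2 hkeq
          subst hkeq
          rcases List.mem_map.mp hk2 with ⟨p, hp, hpk⟩
          have hPp := List.of_mem_filter hp
          rw [contains_mk] at hPp
          simp only [Bool.not_eq_eq_eq_not, Bool.not_true, decide_eq_false_iff_not] at hPp
          apply hPp
          rw [hpk]
          exact hk1
        have hmemF : (kv.1, p0.2) ∈ F.items := by
          rw [hI]
          refine List.mem_append_left _ ?_
          have : patch l (kv.1, p0.2) = (kv.1, p0.2) := by
            unfold patch; rw [getD_mk_not_mem _ _ _ hk, ite_self]
          exact this ▸ List.mem_map_of_mem hv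
        have hgF : F.getD kv.1 "" = p0.2 :=
          PySem.Dict.getD_of_mem_items F hmemF hNodupKeysF ""
        have hPkv : (!((PySem.Dict.mk entry).contains kv.1)) = false := by rw [hc]; rfl
        have hfilt : (l ++ [kv]).filter (fun kv => !((PySem.Dict.mk entry).contains kv.1))
            = l.filter (fun kv => !((PySem.Dict.mk entry).contains kv.1)) := by
          rw [List.filter_append]
          simp only [List.filter_cons, List.filter_nil]
          rw [hPkv]
          simp
        by_cases hvv : p0.2 = ""
        · -- falsy primary value: A overwrites in place; B patches via the comprehension
          rw [if_pos (by rw [hcontF, hgF, hc, hvv]; simp),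
              PySem.Dict.items_insert_of_contains F kv.2 (by rw [hcontF]; exact hc),
              hI, List.map_append, hfilt]
          congr 1
          · rw [List.map_map]
            refine List.map_congr_left (fun p hp => ?_)
            by_cases hpk : p.1 = kv.1
            · have hp2 : p.2 = p0.2 :=
                mem_value_unique entry he (show (kv.1, p.2) ∈ entry by rw [← hpk]; exact hp) hv
              have hv2 : p.2 = "" := hp2.trans hvv
              simp only [Function.comp_apply, patch]
              rw [hpk, hv2, getD_mk_not_mem l kv.1 _ hk,
                PySem.Dict.getD_eq_get?_getD, get?_mk_append_self l kv hk]
              simp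
            · have hgeq : (PySem.Dict.mk (l ++ [kv])).getD p.1 p.2 = (PySem.Dict.mk l).getD p.1 p.2 := by
                rw [PySem.Dict.getD_eq_get?_getD, PySem.Dict.getD_eq_get?_getD,
                  get?_mk_append_ne l kv p.1 hpk]
              have hb : ((p.1 : String) == kv.1) = false := by simpa using hpk
              simp only [Function.comp_apply, patch, hgeq, hb]
              simp
          · refine (List.map_congr_left (fun p hp => ?_)).trans (List.map_id _)
            have : p.1 ≠ kv.1 := by
              intro h
              exact hk (h ▸ List.mem_map_of_mem (List.mem_of_mem_filter hp))
            simp [this]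
        · -- truthy primary value: A leaves it; B's patch keeps it too
          rw [if_neg (by rw [hcontF, hgF, hc]; simp [hvv]), hI, hfilt]
          congr 1
          refine List.map_congr_left (fun p hp => ?_)
          by_cases hpk : p.1 = kv.1
          · have hp2 : p.2 = p0.2 :=
              mem_value_unique entry he (show (kv.1, p.2) ∈ entry by rw [← hpk]; exact hp) hv
            have hv2 : p.2 ≠ "" := by rw [hp2]; exact hvv
            simp only [patch]
            simp [hv2]
          · exact (patch_append_ne l kv p hpk).symm
      · -- fresh key: A appends; B's filter keeps it
        have hcf : (PySem.Dict.mk entry).contains kv.1 = false := by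
          cases hb : (PySem.Dict.mk entry).contains kv.1
          · rfl
          · exact absurd hb hc
        have hPkv : (!((PySem.Dict.mk entry).contains kv.1)) = true := by rw [hcf]; rfl
        rw [if_pos (by rw [hcontF, hcf]; simp),
            PySem.Dict.items_insert_of_not_contains F kv.2 (by rw [hcontF]; exact hcf),
            hI, List.filter_append]
        have hone : [kv].filter (fun kv => !((PySem.Dict.mk entry).contains kv.1)) = [kv] := by
          simp only [List.filter_cons, List.filter_nil]
          rw [hPkv]
          simp
        rw [hone, ← List.append_assoc]
        have hmaps : entry.map (patch l) = entry.map (patch (l ++ [kv])) := by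
          refine List.map_congr_left (fun p hp => ?_)
          refine (patch_append_ne l kv p ?_).symm
          intro h
          have hmem : p.1 ∈ entry.map Prod.fst := List.mem_map_of_mem hp
          rw [h] at hmem
          rw [contains_mk] at hcf
          exact absurd hmem (by simpa using hcf)
        rw [hmaps]

-- per-row equality, then the outer folds, by induction on primary
theorem outer_fold
    (d : PySem.Dict String (List (String × String)))
    (g : List (String × String) → Option (List (String × String)))
    (hg : ∀ e, d.get? ((PySem.Dict.mk e).getD "name" "") = g e)
    (hgnd : ∀ e sec, g e = some sec → (sec.map Prod.fst).Nodup)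
    (primary : List (List (String × String)))
    (hp1 : ∀ r ∈ primary, (r.map Prod.fst).Nodup)
    (acc : List (List (String × String))) :
    primary.foldl (fun merged entry =>
        merged ++ [(match d.get? ((PySem.Dict.mk entry).getD "name" "") with
          | some sec => fillFromA (PySem.Dict.mk entry) sec
          | none => PySem.Dict.mk entry).items]) acc
      = (primary.map (fun e => (e, g e))).foldl (fun res em =>
          match em.2 with
          | none => res ++ [(PySem.Dict.mk em.1).items]
          | some sec =>
            res ++ [((PySem.Dict.mk sec).items.foldl (fun (md : PySem.Dict String String) kv =>
              if md.contains kv.1 then md else md.insert kv.1 kv.2)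
              (PySem.Dict.mk ((PySem.Dict.mk em.1).items.map
                (fun kv => (kv.1, if kv.2 ≠ "" then kv.2
                  else (PySem.Dict.mk sec).getD kv.1 kv.2))))).items]) acc := by
  induction primary generalizing acc with
  | nil => rfl
  | cons e rest ih =>
      simp only [List.foldl_cons, List.map_cons]
      rw [hg e]
      cases hge : g e with
      | none => exact ih (fun r hr => hp1 r (List.mem_cons_of_mem _ hr)) _
      | some sec =>
          have hsnd := hgnd e sec hge
          have hrow : (fillFromA (PySem.Dict.mk e) sec).items
              = ((PySem.Dict.mk sec).items.foldl (fun (md : PySem.Dict String String) kv =>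
                  if md.contains kv.1 then md else md.insert kv.1 kv.2)
                  (PySem.Dict.mk ((PySem.Dict.mk e).items.map
                    (fun kv => (kv.1, if kv.2 ≠ "" then kv.2
                      else (PySem.Dict.mk sec).getD kv.1 kv.2))))).items := by
            rw [foldl_insert_missing _ _ hsnd, fillFromA_items e (hp1 e List.mem_cons_self) sec hsnd]
            show  _ = (e.map (patch sec)) ++ _
            congr 1
            refine List.filter_congr (fun kv _ => ?_)
            have : (PySem.Dict.mk (e.map (patch sec))).contains kv.1
                = (PySem.Dict.mk e).contains kv.1 := by
              rw [contains_mk, contains_mk, List.map_map]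
              rfl
            rw [show (PySem.Dict.mk ((PySem.Dict.mk e).items.map
                (fun kv => (kv.1, if kv.2 ≠ "" then kv.2
                  else (PySem.Dict.mk sec).getD kv.1 kv.2)))) = PySem.Dict.mk (e.map (patch sec)) from rfl,
              this]
          rw [show (match (some sec : Option (List (String × String))) with
              | some sec => fillFromA (PySem.Dict.mk e) sec
              | none => PySem.Dict.mk e) = fillFromA (PySem.Dict.mk e) sec from rfl]
          rw [hrow]
          exact ih (fun r hr => hp1 r (List.mem_cons_of_mem _ hr)) _

-- ===== VERDICT (by name: the statement is the Claim_ definition above) =====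
theorem merge_data_sources_py_spec : Claim_equal_merge_data_sources_py := by
  intro primary secondary _ hpre
  obtain ⟨hp1, hp2⟩ := hpre
  unfold Spec_merge_data_sources_py merge_data_sources_py merge_data_sources_py_alt
  simp only [letFun]  -- zeta-reduce the ports' let-bindings
  by_cases hs : secondary = []
  · rw [if_pos hs, if_pos hs]
  · rw [if_neg hs, if_neg hs]
    by_cases hp : primary = []
    · rw [if_pos hp, if_pos hp]
    · rw [if_neg hp, if_neg hp]
      have hrep : List.replicate primary.length (none : Option (List (String × String)))
          = primary.map (fun _ => none) := by simp
      have hm := matches_eq_map secondary primary (fun _ => none)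
      have hg : ∀ e, (secondary.foldl (fun d e => d.insert ((PySem.Dict.mk e).getD "name" "") e)
          PySem.Dict.empty).get? ((PySem.Dict.mk e).getD "name" "")
          = scan secondary ((PySem.Dict.mk e).getD "name" "") none := by
        intro e
        have := get?_foldl_insert_eq_scan secondary ((PySem.Dict.mk e).getD "name" "")
          PySem.Dict.empty none (by simp)
        simpa [rowName] using this
      have hgnd : ∀ e sec, scan secondary ((PySem.Dict.mk e).getD "name" "") none = some sec
          → (sec.map Prod.fst).Nodup := by
        intro e sec hsec
        rcases scan_mem secondary _ none sec hsec with h | h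
        · exact hp2 sec h
        · cases h
      have H := outer_fold _ _ hg hgnd primary hp1 []
      rw [hrep, hm, zip_self_map]
      exact H
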